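-- pv_equiv track=rewrite | github.com/textolytics/rf_env | lib/python3.13/site-packages/robotmcp/components/variables/variable_resolver.py | _is_valid_index_chain
-- ===== SOURCE A (Python) =====
-- def _is_valid_index_chain(text: str) -> bool:
--     """Check if text is a valid chain of index accesses like [0][key][item]."""
--     if not text:
--         return True
--
--     if not text.startswith('['):
--         return False
--
--     pos = 0
--     while pos < len(text):
--         if text[pos] != '[':
--             return False
--
--         # Find the matching closing bracket
--         bracket_count = 1
--         pos += 1
--         start_pos = pos
--
--         while pos < len(text) and bracket_count > 0:
--             if text[pos] == '[':
--                 bracket_count += 1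
--             elif text[pos] == ']':
--                 bracket_count -= 1
--             pos += 1
--
--         if bracket_count != 0:
--             return False  # Unmatched brackets
--
--         # Check that there's content between the brackets
--         if pos - 1 <= start_pos:
--             return False  # Empty brackets []
--
--     return True
-- ===== SOURCE B (Python) =====
-- def _is_valid_index_chain(text: str) -> bool:
--     """Single flat pass with a depth counter; no nested scanning loops."""
--     depth = 0
--     prev = ''
--     for ch in text:
--         if ch == '[':
--             depth += 1
--         elif ch == ']':
--             if depth == 0:
--                 return False
--             if depth == 1 and prev == '[':
--                 return False  # empty top-level group []
--             depth -= 1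
--         elif depth == 0:
--             return False
--         prev = ch
--     return depth == 0
-- ===== Notes on version B (the rewrite author's own statement) =====
-- stated objective: simpler
-- what changed: Replaced the nested outer-group/inner-bracket-matching while loops with one flat pass over the characters maintaining a depth counter and the previous character, rejecting top-level empty groups at the closing bracket.
import Mathlib
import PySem

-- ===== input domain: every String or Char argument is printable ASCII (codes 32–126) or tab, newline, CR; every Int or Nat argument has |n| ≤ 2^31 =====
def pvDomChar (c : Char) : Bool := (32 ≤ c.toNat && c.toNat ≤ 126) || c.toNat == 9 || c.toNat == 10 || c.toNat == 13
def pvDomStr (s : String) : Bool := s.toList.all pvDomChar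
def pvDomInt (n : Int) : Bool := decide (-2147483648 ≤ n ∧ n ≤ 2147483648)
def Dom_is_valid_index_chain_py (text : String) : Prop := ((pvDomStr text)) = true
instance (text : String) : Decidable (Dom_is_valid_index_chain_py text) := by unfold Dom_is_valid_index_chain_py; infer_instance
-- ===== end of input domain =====

-- B replaces A's nested bracket-matching loops by one flat pass with a depth counter (simpler).

-- ===== PORT A =====
-- inner while loop: scans while pos < len and bracket_count > 0;
-- returns (remaining chars, final bracket_count, number of chars consumed offset by k).
def pvInnerA (l : List Char) (cnt k : Nat) : List Char × Nat × Nat :=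
  match l with
  | [] => ([], cnt, k)
  | c :: rest =>
    if cnt = 0 then (c :: rest, cnt, k)
    else pvInnerA rest (if c = '[' then cnt + 1 else if c = ']' then cnt - 1 else cnt) (k + 1)

-- the remaining list never grows (used for outer-loop termination)
theorem pvInnerA_sublen (l : List Char) (cnt k : Nat) : (pvInnerA l cnt k).1.length ≤ l.length := by
  induction l generalizing cnt k with
  | nil => simp [pvInnerA]
  | cons c rest ih =>
    simp only [pvInnerA]
    split
    · simp
    · exact le_trans (ih _ _) (Nat.le_succ _)

-- outer while loop of A
def pvOuterA (l : List Char) : Bool :=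
  match l with
  | [] => true
  | c :: rest =>
    if c ≠ '[' then false
    else
      let r := pvInnerA rest 1 0
      if r.2.1 ≠ 0 then false
      else if r.2.2 ≤ 1 then false
      else pvOuterA r.1
termination_by l.length
decreasing_by
  have := pvInnerA_sublen rest 1 0
  simp only [List.length_cons]
  omega

def is_valid_index_chain_py (text : String) : Bool :=
  match text.toList with
  | [] => true                                  -- if not text: return True
  | c :: rest => if c ≠ '[' then false          -- if not text.startswith('['): return False
                 else pvOuterA (c :: rest)

-- ===== PORT B =====
-- flat pass: prev is the previous character (none before the first one)
def pvLoopB (l : List Char) (prev : Option Char) (depth : Nat) : Bool :=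
  match l with
  | [] => depth = 0
  | c :: rest =>
    if c = '[' then pvLoopB rest (some c) (depth + 1)
    else if c = ']' then
      if depth = 0 then false
      else if depth = 1 ∧ prev = some '[' then false
      else pvLoopB rest (some c) (depth - 1)
    else
      if depth = 0 then false
      else pvLoopB rest (some c) depth

def is_valid_index_chain_py_alt (text : String) : Bool :=
  pvLoopB text.toList none 0

-- ===== PRECONDITION & SPEC =====
def Spec_is_valid_index_chain_py (text : String) (out : Bool) : Prop := out = is_valid_index_chain_py_alt text
instance (text : String) (out : Bool) : Decidable (Spec_is_valid_index_chain_py text out) := by unfold Spec_is_valid_index_chain_py; infer_instance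

-- ===== CLAIM (what is proved, stated in full; the proofs are below) =====
def Claim_equal_is_valid_index_chain_py : Prop := ∀ (text : String), Dom_is_valid_index_chain_py text → Spec_is_valid_index_chain_py text (is_valid_index_chain_py text)

-- ===== LEMMAS AND PROOFS =====

-- at depth 0, prev is never read before being overwritten
theorem pvLoopB_zero_prev (l : List Char) (p q : Option Char) :
    pvLoopB l p 0 = pvLoopB l q 0 := by
  cases l with
  | nil => rfl
  | cons c rest =>
    simp only [pvLoopB]
    split
    · rfl
    · split
      · simp
      · rfl

theorem pvInnerA_zero (l : List Char) (k : Nat) : pvInnerA l 0 k = (l, 0, k) := by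
  cases l <;> simp [pvInnerA]

-- each step consumes one char and changes cnt by at most 1
theorem pvInnerA_consumed (l : List Char) (cnt k : Nat) :
    k + cnt ≤ (pvInnerA l cnt k).2.2 + (pvInnerA l cnt k).2.1 := by
  induction l generalizing cnt k with
  | nil => simp [pvInnerA]
  | cons c rest ih =>
    simp only [pvInnerA]
    split
    next h => simp
    next h =>
      have := ih (if c = '[' then cnt + 1 else if c = ']' then cnt - 1 else cnt) (k + 1)
      split_ifs at this ⊢ <;> omega

-- inside a group (depth ≥ 1, and if depth = 1 the previous char is not the opener)
-- the flat loop agrees with A's inner scan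
theorem pvLoopB_inner (l : List Char) (cnt k : Nat) (prev : Option Char)
    (h1 : 1 ≤ cnt) (h2 : cnt = 1 → prev ≠ some '[') :
    pvLoopB l prev cnt =
      (if (pvInnerA l cnt k).2.1 ≠ 0 then false else pvLoopB (pvInnerA l cnt k).1 none 0) := by
  induction l generalizing cnt k prev with
  | nil =>
    have hc : cnt ≠ 0 := by omega
    simp [pvLoopB, pvInnerA, hc]
  | cons c rest ih =>
    have hc : ¬ cnt = 0 := by omega
    by_cases hop : c = '['
    · have hi : pvInnerA (c :: rest) cnt k = pvInnerA rest (cnt + 1) (k + 1) := by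
        simp [pvInnerA, hc, hop]
      have hl : pvLoopB (c :: rest) prev cnt = pvLoopB rest (some c) (cnt + 1) := by
        simp [pvLoopB, hop]
      rw [hi, hl, ih (cnt + 1) (k + 1) (some c) (by omega) (fun h => absurd h (by omega))]
    · by_cases hcl : c = ']'
      · by_cases h1' : cnt = 1
        · subst h1'
          have hp : ¬ prev = some '[' := h2 rfl
          have hi : pvInnerA (c :: rest) 1 k = (rest, 0, k + 1) := by
            simp [pvInnerA, hcl, pvInnerA_zero]
          have hl : pvLoopB (c :: rest) prev 1 = pvLoopB rest (some c) 0 := by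
            simp [pvLoopB, hcl, hp]
          rw [hi, hl]
          simpa using pvLoopB_zero_prev rest (some c) none
        · have hp : ¬ ((cnt = 1 ∧ prev = some '[') : Prop) := fun h => h1' h.1
          have hi : pvInnerA (c :: rest) cnt k = pvInnerA rest (cnt - 1) (k + 1) := by
            simp [pvInnerA, hc, hcl]
          have hl : pvLoopB (c :: rest) prev cnt = pvLoopB rest (some c) (cnt - 1) := by
            simp [pvLoopB, hcl, hc, hp]
          rw [hi, hl, ih (cnt - 1) (k + 1) (some c) (by omega)
              (by intro _ hh; simp [hcl] at hh)]
      · have hi : pvInnerA (c :: rest) cnt k = pvInnerA rest cnt (k + 1) := by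
          simp [pvInnerA, hc, hop, hcl]
        have hl : pvLoopB (c :: rest) prev cnt = pvLoopB rest (some c) cnt := by
          simp [pvLoopB, hop, hcl, hc]
        rw [hi, hl, ih cnt (k + 1) (some c) h1 (by intro _ hh; simp at hh; exact hop hh)]

-- after seeing the opening '[' of a top-level group, the flat loop agrees with
-- A's inner scan including the empty-group check
theorem pvLoopB_group (rest : List Char) :
    pvLoopB rest (some '[') 1 =
      (if (pvInnerA rest 1 0).2.1 ≠ 0 then false
       else if (pvInnerA rest 1 0).2.2 ≤ 1 then false
       else pvLoopB (pvInnerA rest 1 0).1 none 0) := by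
  cases rest with
  | nil => simp [pvInnerA, pvLoopB]
  | cons c rest' =>
    by_cases hop : c = '['
    · have hi : pvInnerA (c :: rest') 1 0 = pvInnerA rest' 2 1 := by
        simp [pvInnerA, hop]
      have hl : pvLoopB (c :: rest') (some '[') 1 = pvLoopB rest' (some c) 2 := by
        simp [pvLoopB, hop]
      rw [hi, hl, pvLoopB_inner rest' 2 1 (some c) (by omega) (fun h => absurd h (by omega))]
      have hcons := pvInnerA_consumed rest' 2 1
      by_cases hz : (pvInnerA rest' 2 1).2.1 = 0
      · have : ¬ (pvInnerA rest' 2 1).2.2 ≤ 1 := by omega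
        simp [hz, this]
      · simp [hz]
    · by_cases hcl : c = ']'
      · have hi : pvInnerA (c :: rest') 1 0 = (rest', 0, 1) := by
          simp [pvInnerA, hcl, pvInnerA_zero]
        have hl : pvLoopB (c :: rest') (some '[') 1 = false := by
          simp [pvLoopB, hcl]
        rw [hi, hl]
        simp
      · have hi : pvInnerA (c :: rest') 1 0 = pvInnerA rest' 1 1 := by
          simp [pvInnerA, hop, hcl]
        have hl : pvLoopB (c :: rest') (some '[') 1 = pvLoopB rest' (some c) 1 := by
          simp [pvLoopB, hop, hcl]
        rw [hi, hl, pvLoopB_inner rest' 1 1 (some c) (by omega)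
            (by intro _ hh; simp at hh; exact hop hh)]
        have hcons := pvInnerA_consumed rest' 1 1
        by_cases hz : (pvInnerA rest' 1 1).2.1 = 0
        · have : ¬ (pvInnerA rest' 1 1).2.2 ≤ 1 := by omega
          simp [hz, this]
        · simp [hz]

theorem pvOuter_eq (n : Nat) (l : List Char) (hn : l.length ≤ n) :
    pvOuterA l = pvLoopB l none 0 := by
  induction n generalizing l with
  | zero =>
    have : l = [] := by cases l <;> simp_all
    subst this; simp [pvOuterA, pvLoopB]
  | succ n ih =>
    cases l with
    | nil => simp [pvOuterA, pvLoopB]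
    | cons c rest =>
      simp only [pvOuterA, pvLoopB]
      by_cases hop : c = '['
      · simp only [hop, if_neg (by simp : ¬ ('[' : Char) ≠ '[')]
        rw [pvLoopB_group rest]
        by_cases hz : (pvInnerA rest 1 0).2.1 = 0
        · by_cases hle : (pvInnerA rest 1 0).2.2 ≤ 1
          · simp [hz, hle]
          · have hlen : (pvInnerA rest 1 0).1.length ≤ n := by
              have := pvInnerA_sublen rest 1 0
              simp at hn; omega
            simp only [hz, hle, ne_eq, not_true_eq_false, if_false]
            rw [ih _ hlen]
            simp
        · simp [hz]
      · simp only [if_pos (by simp [hop] : c ≠ '['), if_neg hop]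
        by_cases hcl : c = ']' <;> simp [hcl]

-- ===== VERDICT (by name: the statement is the Claim_ definition above) =====
theorem is_valid_index_chain_py_spec : Claim_equal_is_valid_index_chain_py := by
  intro text _
  unfold Spec_is_valid_index_chain_py is_valid_index_chain_py is_valid_index_chain_py_alt
  cases h : text.toList with
  | nil => rfl
  | cons c rest =>
    by_cases hop : c = '['
    · simp only [if_neg (by simp [hop] : ¬ c ≠ '[')]
      exact pvOuter_eq (c :: rest).length _ le_rfl
    · simp only [if_pos (by simp [hop] : c ≠ '['), pvLoopB]
      by_cases hcl : c = ']' <;> simp [hop, hcl]
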